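-- pv_equiv track=rewrite | github.com/imn-climatologias-aeropuertos/climatologias-aeropuertos | clima/graphics/__init__.py | hours_range
-- ===== SOURCE A (Python) =====
-- def hours_range(station: str):
--     hours = []
--
--     if station == "mrlm" or station == "mrpv":
--         return [i for i in range(12, 25)]
--
--     if station == "mroc":
--         for i in range(7, 12):
--             hours.append(i)
--
--     if station == "mroc" or station == "mrlb":
--         for i in range(12, 25):
--             hours.append(i)
--
--         for i in range(1, 7):
--             hours.append(i)
--
--     return hours
-- ===== SOURCE B (Python) =====
-- _HOURS_TABLE = {
--     "mrlm": list(range(12, 25)),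
--     "mrpv": list(range(12, 25)),
--     "mroc": list(range(7, 12)) + list(range(12, 25)) + list(range(1, 7)),
--     "mrlb": list(range(12, 25)) + list(range(1, 7)),
-- }
--
-- def hours_range(station: str):
--     return list(_HOURS_TABLE.get(station, []))
-- ===== Notes on version B (the rewrite author's own statement) =====
-- stated objective: simpler
-- what changed: Replaced the sequential if-guards and three append loops with a precomputed station->hour-list table and a single dict lookup defaulting to [].
import Mathlib
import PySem

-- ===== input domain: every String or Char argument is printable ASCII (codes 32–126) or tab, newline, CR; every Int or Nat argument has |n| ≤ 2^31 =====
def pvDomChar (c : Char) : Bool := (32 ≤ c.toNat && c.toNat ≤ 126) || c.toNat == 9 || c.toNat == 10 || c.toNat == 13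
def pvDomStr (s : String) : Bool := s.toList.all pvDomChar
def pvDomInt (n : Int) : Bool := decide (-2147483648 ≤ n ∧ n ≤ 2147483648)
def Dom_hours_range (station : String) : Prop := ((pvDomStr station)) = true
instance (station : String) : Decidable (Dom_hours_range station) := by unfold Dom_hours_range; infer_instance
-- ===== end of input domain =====

-- B replaces A's sequential if-guards and append loops with one precomputed station->hours table lookup (objective: simpler).


-- ===== PORT A =====
def hours_range (station : String) : List Int :=
  let hours : List Int := []
  if station == "mrlm" || station == "mrpv" then
    (PySem.List.pyRange 12 25 1).map (fun i => i)
  else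
    let hours := if station == "mroc" then
        (PySem.List.pyRange 7 12 1).foldl (fun acc i => acc ++ [i]) hours
      else hours
    let hours := if station == "mroc" || station == "mrlb" then
        let hours := (PySem.List.pyRange 12 25 1).foldl (fun acc i => acc ++ [i]) hours
        (PySem.List.pyRange 1 7 1).foldl (fun acc i => acc ++ [i]) hours
      else hours
    hours

-- ===== PORT B =====
def hoursTable : PySem.Dict String (List Int) :=
  PySem.Dict.ofList
    [ ("mrlm", PySem.List.pyRange 12 25 1),
      ("mrpv", PySem.List.pyRange 12 25 1),
      ("mroc", PySem.List.pyRange 7 12 1 ++ PySem.List.pyRange 12 25 1 ++ PySem.List.pyRange 1 7 1),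
      ("mrlb", PySem.List.pyRange 12 25 1 ++ PySem.List.pyRange 1 7 1) ]

def hours_range_alt (station : String) : List Int :=
  PySem.Dict.getD hoursTable station []

-- ===== PRECONDITION & SPEC =====
def Spec_hours_range (station : String) (out : List Int) : Prop := out = hours_range_alt station
instance (station : String) (out : List Int) : Decidable (Spec_hours_range station out) := by unfold Spec_hours_range; infer_instance

-- ===== CLAIM (what is proved, stated in full; the proofs are below) =====
def Claim_equal_hours_range : Prop := ∀ (station : String), Dom_hours_range station → Spec_hours_range station (hours_range station)

-- ===== LEMMAS AND PROOFS =====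
theorem hours_range_cases (s : String) (h1 : s ≠ "mrlm") (h2 : s ≠ "mrpv")
    (h3 : s ≠ "mroc") (h4 : s ≠ "mrlb") :
    hours_range s = [] ∧ hours_range_alt s = [] := by
  constructor
  · simp [hours_range, h1, h2, h3, h4]
  · have e1 : ("mrlm" == s) = false := by simp [Ne.symm h1]
    have e2 : ("mrpv" == s) = false := by simp [Ne.symm h2]
    have e3 : ("mroc" == s) = false := by simp [Ne.symm h3]
    have e4 : ("mrlb" == s) = false := by simp [Ne.symm h4]
    simp [hours_range_alt, hoursTable, PySem.Dict.getD, PySem.Dict.ofList, PySem.Dict.get?,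
      PySem.Dict.update, PySem.Dict.empty, PySem.Dict.insert, PySem.Dict.contains, List.find?,
      e1, e2, e3, e4]

-- ===== VERDICT (by name: the statement is the Claim_ definition above) =====
theorem hours_range_spec : Claim_equal_hours_range := by
  intro s _
  unfold Spec_hours_range
  by_cases h1 : s = "mrlm"
  · subst h1; decide
  · by_cases h2 : s = "mrpv"
    · subst h2; decide
    · by_cases h3 : s = "mroc"
      · subst h3; decide
      · by_cases h4 : s = "mrlb"
        · subst h4; decide
        · have := hours_range_cases s h1 h2 h3 h4
          rw [this.1, this.2]
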